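-- pv_equiv track=rewrite | github.com/DavideCristoni/advent-of-code-2023 | 1/1.py | getLastDigitPlus
-- ===== SOURCE A (Python) =====
-- rebmun = ['eno', 'owt', 'eerht', 'ruof', 'evif', 'xis', 'neves', 'thgie', 'enin']
--
-- def getLastDigitPlus(calibration_line:str):
--     reversed = calibration_line[::-1]
--     matching_numbers = []
--     indexes = []
--     for character in reversed:
--         if character.isdigit():
--             return character
--         if matching_numbers:
--             i = 0
--             while i < len (matching_numbers):
--                 if character != matching_numbers[i][indexes[i]]:
--                     indexes.pop(i)
--                     matching_numbers.pop(i)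
--                 else:
--                     indexes[i] += 1
--                     if len(matching_numbers[i]) == indexes[i]:
--                         return str(rebmun.index(matching_numbers[i]) + 1)
--                     i += 1
--         for letter_number in rebmun:
--             if character == letter_number[0]:
--                 matching_numbers.append(letter_number)
--                 indexes.append(1)
-- ===== SOURCE B (Python) =====
-- words = ['one', 'two', 'three', 'four', 'five', 'six', 'seven', 'eight', 'nine']
--
-- def getLastDigitPlus(calibration_line: str):
--     for i in range(len(calibration_line) - 1, -1, -1):
--         ch = calibration_line[i]
--         if ch.isdigit():
--             return ch
--         for value, word in enumerate(words, 1):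
--             if calibration_line.startswith(word, i):
--                 return str(value)
--     return None
-- ===== Notes on version B (the rewrite author's own statement) =====
-- stated objective: simpler
-- what changed: Replaces the reversed-string incremental candidate-tracking automaton (parallel lists of partially matched reversed words with per-candidate indexes, popped/advanced per character) by a direct right-to-left scan that at each position returns the digit there or probes each spelled word with startswith at that position.
import Mathlib
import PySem

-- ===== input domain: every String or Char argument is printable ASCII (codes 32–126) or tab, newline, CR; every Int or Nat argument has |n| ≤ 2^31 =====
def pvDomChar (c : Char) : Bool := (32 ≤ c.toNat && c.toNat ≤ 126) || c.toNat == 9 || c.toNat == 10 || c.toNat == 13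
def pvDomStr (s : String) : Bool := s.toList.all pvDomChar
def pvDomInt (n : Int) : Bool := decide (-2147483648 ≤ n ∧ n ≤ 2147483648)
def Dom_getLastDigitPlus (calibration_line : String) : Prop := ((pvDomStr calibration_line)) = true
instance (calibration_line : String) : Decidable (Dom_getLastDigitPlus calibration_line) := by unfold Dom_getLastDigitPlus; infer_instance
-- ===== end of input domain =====

-- ===== PORT A =====
-- B replaces A's reversed-string candidate-tracking automaton by a direct right-to-left
-- per-position startswith probe; objective: simpler. Proved: same return value on all inputs.
-- rebmun: the spelled digit words, reversed, as in the Python module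
def rebmunL : List (List Char) :=
  [['e','n','o'], ['o','w','t'], ['e','e','r','h','t'], ['r','u','o','f'],
   ['e','v','i','f'], ['x','i','s'], ['n','e','v','e','s'], ['t','h','g','i','e'], ['e','n','i','n']]

-- the inner `while i < len(matching_numbers)` loop; matching_numbers/indexes kept as one list of pairs
-- (they are traversed and popped in lockstep in the Python).  .inl r = `return r`, .inr l = loop finished.
def scanCands (c : Char) : List (List Char × Nat) → String ⊕ List (List Char × Nat)
  | [] => .inr []
  | (w, j) :: rest =>
    if PySem.List.pyGet? w (j : Int) ≠ some c then
      scanCands c rest                          -- pop(i) on both lists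
    else if w.length = j + 1 then
      -- return str(rebmun.index(matching_numbers[i]) + 1); every candidate comes from rebmun,
      -- so Python's list.index cannot raise ValueError and the .getD 0 default is never taken
      .inl (PySem.Int.toStr (((PySem.List.index? rebmunL w).getD 0 : Int) + 1))
    else
      match scanCands c rest with
      | .inl r => .inl r
      | .inr l => .inr ((w, j + 1) :: l)

-- `for letter_number in rebmun: if character == letter_number[0]: append (letter_number, 1)`
def newCands (c : Char) : List (List Char × Nat) :=
  rebmunL.filterMap (fun w => if PySem.List.pyGet? w 0 = some c then some (w, 1) else none)

-- `for character in reversed:` with the running candidate state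
def loopA : List Char → List (List Char × Nat) → Option String
  | [], _ => none
  | c :: rest, cands =>
    if PySem.Chars.isdigit c then some (String.ofList [c])
    else
      match scanCands c cands with
      | .inl r => some r
      | .inr survivors => loopA rest (survivors ++ newCands c)

def getLastDigitPlus (calibration_line : String) : Option String :=
  loopA calibration_line.toList.reverse []      -- reversed = calibration_line[::-1]

-- ===== PORT B =====
def wordVals : List (List Char × Int) :=
  [(['o','n','e'],1), (['t','w','o'],2), (['t','h','r','e','e'],3), (['f','o','u','r'],4),
   (['f','i','v','e'],5), (['s','i','x'],6), (['s','e','v','e','n'],7),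
   (['e','i','g','h','t'],8), (['n','i','n','e'],9)]

-- `for value, word in enumerate(words, 1): if calibration_line.startswith(word, i): return str(value)`
-- (startswith(word, i) is exactly: word is a prefix of the suffix starting at i)
def tryWords (t : List Char) (i : Nat) : List (List Char × Int) → Option String
  | [] => none
  | (w, v) :: rest =>
    if PySem.Chars.startswith (t.drop i) w then some (PySem.Int.toStr v)
    else tryWords t i rest

-- `for i in range(len(s)-1, -1, -1)` as a countdown; n+1 means current index n
def loopB (t : List Char) : Nat → Option String
  | 0 => none
  | n + 1 =>
    let c := t.getD n ' '       -- n < t.length on every call reached from getLastDigitPlus_alt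
    if PySem.Chars.isdigit c then some (String.ofList [c])
    else
      match tryWords t n wordVals with
      | some r => some r
      | none => loopB t n

def getLastDigitPlus_alt (calibration_line : String) : Option String :=
  loopB calibration_line.toList calibration_line.toList.length

-- ===== PRECONDITION & SPEC =====
def Spec_getLastDigitPlus (calibration_line : String) (out : Option String) : Prop := out = getLastDigitPlus_alt calibration_line
instance (calibration_line : String) (out : Option String) : Decidable (Spec_getLastDigitPlus calibration_line out) := by unfold Spec_getLastDigitPlus; infer_instance

-- ===== CLAIM (what is proved, stated in full; the proofs are below) =====
def Claim_equal_getLastDigitPlus : Prop := ∀ (calibration_line : String), Dom_getLastDigitPlus calibration_line → Spec_getLastDigitPlus calibration_line (getLastDigitPlus calibration_line)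

-- ===== LEMMAS AND PROOFS =====

-- a candidate (w, j) is a partially matched reversed word whose original-string end lies at
-- position m + j - 1 when positions ≥ m are the ones already consumed
def CandOk (t : List Char) (m : Nat) (p : List Char × Nat) : Prop :=
  p.1 ∈ rebmunL ∧ 1 ≤ p.2 ∧ p.2 < p.1.length ∧ m + p.2 ≤ t.length ∧
    ∀ i < p.2, p.1[i]? = t[m + p.2 - 1 - i]?

-- invariant of A's state before processing position m-1: exactly the live partial matches
def AInv (t : List Char) (m : Nat) (cands : List (List Char × Nat)) : Prop :=
  (∀ p ∈ cands, CandOk t m p) ∧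
  (∀ w ∈ rebmunL, ∀ j, 1 ≤ j → j < w.length → m + j ≤ t.length →
      (∀ i < j, w[i]? = t[m + j - 1 - i]?) → (w, j) ∈ cands)

lemma rebmun_len (w : List Char) (hw : w ∈ rebmunL) : 3 ≤ w.length := by
  fin_cases hw <;> decide

-- no spelled word is a (reversed) prefix of another: at most one word can start at a position
lemma rebmun_unique (w1 w2 : List Char) (h1 : w1 ∈ rebmunL) (h2 : w2 ∈ rebmunL)
    (h : w1.reverse <+: w2.reverse ∨ w2.reverse <+: w1.reverse) : w1 = w2 := by
  fin_cases h1 <;> fin_cases h2 <;> revert h <;> decide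

lemma rebmun_val (w : List Char) (hw : w ∈ rebmunL) :
    ∀ p ∈ wordVals, p.1 = w.reverse →
      PySem.Int.toStr p.2 = PySem.Int.toStr (((PySem.List.index? rebmunL w).getD 0 : Int) + 1) := by
  fin_cases hw <;> decide

lemma rebmun_rev_mem (w : List Char) (hw : w ∈ rebmunL) : w.reverse ∈ wordVals.map Prod.fst := by
  fin_cases hw <;> decide

lemma wordVals_rev_mem (p : List Char × Int) (hp : p ∈ wordVals) : p.1.reverse ∈ rebmunL := by
  fin_cases hp <;> decide

-- prefix of a suffix, pointwise
lemma prefix_drop_iff (w t : List Char) (m : Nat) (hw : w ≠ []) :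
    w <+: t.drop m ↔ (m + w.length ≤ t.length ∧ ∀ i < w.length, w[i]? = t[m + i]?) := by
  constructor
  · intro h
    have hlen : w.length ≤ (t.drop m).length := h.length_le
    have hm : m + w.length ≤ t.length := by
      by_cases h' : m ≤ t.length
      · simp [List.length_drop] at hlen; omega
      · exfalso; have hd : t.drop m = [] := by rw [List.drop_eq_nil_iff]; omega
        rw [hd] at h; exact hw (List.prefix_nil.mp h)
    refine ⟨hm, fun i hi => ?_⟩
    obtain ⟨s, hs⟩ := h
    rw [← List.getElem?_append_left (l₂ := s) hi, hs, List.getElem?_drop]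
  · rintro ⟨hm, h⟩
    rw [List.prefix_iff_eq_take]
    apply List.ext_getElem?
    intro i
    by_cases hi : i < w.length
    · rw [List.getElem?_take_of_lt hi, List.getElem?_drop, h i hi]
    · rw [List.getElem?_eq_none (by simpa using hi), Eq.comm, List.getElem?_eq_none]
      simp [List.length_take]
      omega

-- reversed occurrence, pointwise on the reversed word
lemma rev_prefix_iff (w t : List Char) (m : Nat) (hw : w ≠ []) :
    w.reverse <+: t.drop m ↔
      (m + w.length ≤ t.length ∧ ∀ i < w.length, w[i]? = t[m + w.length - 1 - i]?) := by
  rw [prefix_drop_iff _ _ _ (by simpa using hw), List.length_reverse]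
  refine and_congr_right fun hm => ?_
  constructor
  · intro h i hi
    have := h (w.length - 1 - i) (by omega)
    rw [List.getElem?_reverse (by omega)] at this
    have e1 : w.length - 1 - (w.length - 1 - i) = i := by omega
    have e2 : m + (w.length - 1 - i) = m + w.length - 1 - i := by omega
    rw [e1, e2] at this; exact this
  · intro h i hi
    rw [List.getElem?_reverse hi]
    have := h (w.length - 1 - i) (by omega)
    have e2 : m + w.length - 1 - (w.length - 1 - i) = m + i := by omega
    rw [e2] at this; exact this

-- A's inner loop returns the completed word's value when (the reverse of) w ∈ rebmunL occurs at m
lemma scan_occ_aux (t : List Char) (m : Nat) (hm : m < t.length)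
    (w : List Char) (hw : w ∈ rebmunL)
    (hfit : m + w.length ≤ t.length)
    (hocc : ∀ i < w.length, w[i]? = t[m + w.length - 1 - i]?) :
    ∀ l : List (List Char × Nat), (∀ p ∈ l, CandOk t (m + 1) p) →
      (w, w.length - 1) ∈ l →
      scanCands (t[m]'hm) l
        = .inl (PySem.Int.toStr (((PySem.List.index? rebmunL w).getD 0 : Int) + 1)) := by
  have hlen := rebmun_len w hw
  have hchar : w[w.length - 1]? = some (t[m]'hm) := by
    have h0 := hocc (w.length - 1) (by omega)
    have e : m + w.length - 1 - (w.length - 1) = m := by omega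
    rw [e] at h0; rw [h0, List.getElem?_eq_getElem hm]
  intro l
  induction l with
  | nil => intro _ hmem; simp at hmem
  | cons p rest ih =>
    intro hsound hmem
    obtain ⟨w', j'⟩ := p
    rw [scanCands]
    by_cases hmatch : PySem.List.pyGet? w' (j' : Int) = some (t[m]'hm)
    · rw [if_neg (not_not_intro hmatch)]
      by_cases hcomp : w'.length = j' + 1
      · rw [if_pos hcomp]
        obtain ⟨hw', h1, h2, h3, h4⟩ := hsound (w', j') (by simp)
        have hfit' : m + w'.length ≤ t.length := by omega
        have hocc' : ∀ i < w'.length, w'[i]? = t[m + w'.length - 1 - i]? := by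
          intro i hi
          by_cases hij : i < j'
          · have h5 := h4 i hij
            have e : m + 1 + j' - 1 - i = m + w'.length - 1 - i := by omega
            rw [e] at h5; exact h5
          · have hij' : i = j' := by omega
            rw [hij']
            have e : m + w'.length - 1 - j' = m := by omega
            rw [e, List.getElem?_eq_getElem hm]
            simpa using hmatch
        have hww : w' = w := by
          apply rebmun_unique w' w hw' hw
          have p1 : w'.reverse <+: t.drop m :=
            (rev_prefix_iff w' t m (by intro h0; simp [h0] at h2)).mpr ⟨hfit', hocc'⟩
          have p2 : w.reverse <+: t.drop m :=
            (rev_prefix_iff w t m (by intro h0; simp [h0] at hlen)).mpr ⟨hfit, hocc⟩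
          exact List.prefix_or_prefix_of_prefix p1 p2
        rw [hww]
      · rw [if_neg hcomp]
        have hrest : (w, w.length - 1) ∈ rest := by
          rcases List.mem_cons.mp hmem with h0 | h0
          · exfalso
            have hw'w : w = w' := congrArg Prod.fst h0
            have hj' : w.length - 1 = j' := congrArg Prod.snd h0
            apply hcomp; rw [← hw'w, ← hj']; omega
          · exact h0
        rw [ih (fun q hq => hsound q (by simp [hq])) hrest]
    · rw [if_pos hmatch]
      have hrest : (w, w.length - 1) ∈ rest := by
        rcases List.mem_cons.mp hmem with h0 | h0
        · exfalso
          have hw'w : w = w' := congrArg Prod.fst h0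
          have hj' : w.length - 1 = j' := congrArg Prod.snd h0
          apply hmatch
          rw [← hw'w, ← hj', PySem.List.pyGet?_natCast]
          exact hchar
        · exact h0
      exact ih (fun q hq => hsound q (by simp [hq])) hrest

lemma scan_of_occurs (t : List Char) (m : Nat) (cands : List (List Char × Nat))
    (hInv : AInv t (m + 1) cands) (hm : m < t.length)
    (w : List Char) (hw : w ∈ rebmunL)
    (hfit : m + w.length ≤ t.length)
    (hocc : ∀ i < w.length, w[i]? = t[m + w.length - 1 - i]?) :
    scanCands (t[m]'hm) cands
      = .inl (PySem.Int.toStr (((PySem.List.index? rebmunL w).getD 0 : Int) + 1)) := by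
  have hlen := rebmun_len w hw
  apply scan_occ_aux t m hm w hw hfit hocc cands hInv.1
  apply hInv.2 w hw (w.length - 1) (by omega) (by omega) (by omega)
  intro i hi
  have h0 := hocc i (by omega)
  have e : m + 1 + (w.length - 1) - 1 - i = m + w.length - 1 - i := by omega
  rw [e]; exact h0

-- a candidate that matches the current character and completes is a word occurrence at m
lemma cand_occ (t : List Char) (m : Nat) (hm : m < t.length) (w' : List Char) (j' : Nat)
    (h3 : m + 1 + j' ≤ t.length)
    (h4 : ∀ i < j', w'[i]? = t[m + 1 + j' - 1 - i]?)
    (hmatch : w'[j']? = some (t[m]'hm)) (hcomp : w'.length = j' + 1) :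
    m + w'.length ≤ t.length ∧ ∀ i < w'.length, w'[i]? = t[m + w'.length - 1 - i]? := by
  refine ⟨by omega, ?_⟩
  intro i hi
  by_cases hij : i < j'
  · have h5 := h4 i hij
    have e : m + 1 + j' - 1 - i = m + w'.length - 1 - i := by omega
    rw [e] at h5; exact h5
  · have hij' : i = j' := by omega
    rw [hij']
    have e : m + w'.length - 1 - j' = m := by omega
    rw [e, List.getElem?_eq_getElem hm]
    exact hmatch

-- when no word occurs at m the inner loop pops the mismatches and advances the matches
lemma scan_no_aux (t : List Char) (m : Nat) (hm : m < t.length)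
    (hno : ∀ w ∈ rebmunL, ¬ (m + w.length ≤ t.length ∧ ∀ i < w.length, w[i]? = t[m + w.length - 1 - i]?)) :
    ∀ l : List (List Char × Nat), (∀ p ∈ l, CandOk t (m + 1) p) →
      scanCands (t[m]'hm) l
        = .inr (l.filterMap (fun p =>
            if p.1[p.2]? = some (t[m]'hm) then some (p.1, p.2 + 1) else none)) := by
  intro l
  induction l with
  | nil => intro _; rfl
  | cons p rest ih =>
    intro hs
    obtain ⟨w', j'⟩ := p
    obtain ⟨hw', h1, h2, h3, h4⟩ := hs (w', j') (by simp)
    rw [scanCands]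
    by_cases hmatch : PySem.List.pyGet? w' (j' : Int) = some (t[m]'hm)
    · rw [if_neg (not_not_intro hmatch)]
      have hmatch' : w'[j']? = some (t[m]'hm) := by simpa using hmatch
      have hcomp : ¬ w'.length = j' + 1 := fun hcomp =>
        hno w' hw' (cand_occ t m hm w' j' h3 h4 hmatch' hcomp)
      rw [if_neg hcomp, ih (fun q hq => hs q (by simp [hq]))]
      simp [hmatch']
    · rw [if_pos hmatch, ih (fun q hq => hs q (by simp [hq]))]
      have hmatch' : ¬ w'[j']? = some (t[m]'hm) := by simpa using hmatch
      simp [hmatch']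

-- when no word occurs at m, the inner loop completes and the invariant advances
lemma scan_no_occur (t : List Char) (m : Nat) (cands : List (List Char × Nat))
    (hInv : AInv t (m + 1) cands) (hm : m < t.length)
    (hno : ∀ w ∈ rebmunL, ¬ (m + w.length ≤ t.length ∧ ∀ i < w.length, w[i]? = t[m + w.length - 1 - i]?)) :
    ∃ l, scanCands (t[m]'hm) cands = .inr l ∧ AInv t m (l ++ newCands (t[m]'hm)) := by
  refine ⟨_, scan_no_aux t m hm hno cands hInv.1, ?_⟩
  constructor
  · -- soundness of the advanced state
    intro p hp
    rcases List.mem_append.mp hp with hp | hp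
    · rw [List.mem_filterMap] at hp
      obtain ⟨⟨w, j⟩, hq, hf⟩ := hp
      obtain ⟨hw, h1, h2, h3, h4⟩ := hInv.1 (w, j) hq
      replace h2 : j < w.length := h2
      replace h3 : m + 1 + j ≤ t.length := h3
      replace h4 : ∀ i < j, w[i]? = t[m + 1 + j - 1 - i]? := h4
      by_cases hc : w[j]? = some (t[m]'hm)
      · rw [if_pos hc] at hf
        obtain rfl : (w, j + 1) = p := Option.some_injective _ hf
        refine ⟨hw, show 1 ≤ j + 1 by omega, show j + 1 < w.length from ?_,
          show m + (j + 1) ≤ t.length by omega, ?_⟩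
        · rcases Nat.lt_or_ge (j + 1) w.length with h | h
          · exact h
          · exfalso
            exact hno w hw (cand_occ t m hm w j h3 h4 hc (by omega))
        · intro i hi
          replace hi : i < j + 1 := hi
          show w[i]? = t[m + (j + 1) - 1 - i]?
          by_cases hij : i < j
          · have h5 := h4 i hij
            have e : m + 1 + j - 1 - i = m + (j + 1) - 1 - i := by omega
            rw [e] at h5; exact h5
          · have hij' : i = j := by omega
            rw [hij']
            have e : m + (j + 1) - 1 - j = m := by omega
            rw [e, List.getElem?_eq_getElem hm]
            exact hc
      · rw [if_neg hc] at hf; exact absurd hf (by simp)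
    · rw [newCands, List.mem_filterMap] at hp
      obtain ⟨w, hw, hf⟩ := hp
      by_cases hc : PySem.List.pyGet? w 0 = some (t[m]'hm)
      · rw [if_pos hc] at hf
        obtain rfl : (w, 1) = p := Option.some_injective _ hf
        refine ⟨hw, le_rfl, show 1 < w.length by have := rebmun_len w hw; omega,
          show m + 1 ≤ t.length by omega, ?_⟩
        intro i hi
        replace hi : i < 1 := hi
        show w[i]? = t[m + 1 - 1 - i]?
        have hi0 : i = 0 := by omega
        rw [hi0]
        have e : m + 1 - 1 - 0 = m := by omega
        rw [e, List.getElem?_eq_getElem hm]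
        rw [PySem.List.pyGet?_zero] at hc
        exact hc
      · rw [if_neg hc] at hf; exact absurd hf (by simp)
  · -- completeness of the advanced state
    intro w hw j h1 h2 h3 hmatch
    by_cases hj : j = 1
    · refine List.mem_append.mpr (Or.inr ?_)
      rw [newCands, List.mem_filterMap]
      refine ⟨w, hw, ?_⟩
      have hcond : PySem.List.pyGet? w 0 = some (t[m]'hm) := by
        have h0 := hmatch 0 (by omega)
        have e : m + j - 1 - 0 = m := by omega
        rw [e, List.getElem?_eq_getElem hm] at h0
        rw [PySem.List.pyGet?_zero]
        exact h0
      rw [if_pos hcond, hj]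
    · refine List.mem_append.mpr (Or.inl ?_)
      have hmem : (w, j - 1) ∈ cands := by
        apply hInv.2 w hw (j - 1) (by omega) (by omega) (by omega)
        intro i hi
        have h0 := hmatch i (by omega)
        have e : m + 1 + (j - 1) - 1 - i = m + j - 1 - i := by omega
        rw [e]; exact h0
      rw [List.mem_filterMap]
      refine ⟨(w, j - 1), hmem, ?_⟩
      have hcond : w[j - 1]? = some (t[m]'hm) := by
        have h0 := hmatch (j - 1) (by omega)
        have e : m + j - 1 - (j - 1) = m := by omega
        rw [e, List.getElem?_eq_getElem hm] at h0
        exact h0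
      simp only [hcond, if_pos]
      have e : j - 1 + 1 = j := by omega
      rw [e]

lemma tryWords_some_aux (t : List Char) (m : Nat) (w : List Char) (v : String)
    (hw : w ∈ rebmunL) (hocc : w.reverse <+: t.drop m) :
    ∀ l : List (List Char × Int),
      (∀ p ∈ l, p.1.reverse ∈ rebmunL) →
      (∀ p ∈ l, p.1 = w.reverse → PySem.Int.toStr p.2 = v) →
      w.reverse ∈ l.map Prod.fst →
      tryWords t m l = some v := by
  intro l
  induction l with
  | nil => intro _ _ h3; simp at h3
  | cons p rest ih =>
    intro H1 H2 H3
    obtain ⟨u, x⟩ := p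
    rw [tryWords]
    by_cases hsw : u <+: t.drop m
    · rw [if_pos ((PySem.Chars.startswith_iff _ _).mpr hsw)]
      have hu : u.reverse ∈ rebmunL := H1 (u, x) (by simp)
      have hcmp := List.prefix_or_prefix_of_prefix hsw hocc
      have huw : u = w.reverse := by
        have := rebmun_unique u.reverse w hu hw (by rw [List.reverse_reverse]; exact hcmp)
        rw [← this, List.reverse_reverse]
      rw [H2 (u, x) (by simp) huw]
    · rw [if_neg (fun hc => hsw ((PySem.Chars.startswith_iff _ _).mp hc))]
      refine ih (fun q hq => H1 q (by simp [hq])) (fun q hq => H2 q (by simp [hq])) ?_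
      rcases (by simpa using H3 : w.reverse = u ∨ ∃ y, (w.reverse, y) ∈ rest) with h | h
      · exact absurd (h ▸ hocc) hsw
      · simpa using h

lemma tryWords_some (t : List Char) (m : Nat) (w : List Char) (hw : w ∈ rebmunL)
    (hocc : w.reverse <+: t.drop m) :
    tryWords t m wordVals
      = some (PySem.Int.toStr (((PySem.List.index? rebmunL w).getD 0 : Int) + 1)) := by
  exact tryWords_some_aux t m w _ hw hocc wordVals wordVals_rev_mem (rebmun_val w hw)
    (rebmun_rev_mem w hw)

lemma tryWords_none (t : List Char) (m : Nat)
    (hno : ∀ p ∈ wordVals, ¬ p.1 <+: t.drop m) :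
    tryWords t m wordVals = none := by
  have : ∀ l : List (List Char × Int), (∀ p ∈ l, ¬ p.1 <+: t.drop m) → tryWords t m l = none := by
    intro l
    induction l with
    | nil => intro _; rfl
    | cons p rest ih =>
      intro hn
      obtain ⟨u, x⟩ := p
      rw [tryWords, if_neg (fun hc => hn (u, x) (by simp) ((PySem.Chars.startswith_iff _ _).mp hc))]
      exact ih (fun q hq => hn q (by simp [hq]))
  exact this wordVals hno

lemma main_loop (t : List Char) :
    ∀ m, m ≤ t.length → ∀ cands, AInv t m cands →
      loopA (t.reverse.drop (t.length - m)) cands = loopB t m := by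
  intro m
  induction m with
  | zero =>
    intro _ cands _
    rw [Nat.sub_zero, ← List.length_reverse, List.drop_length]
    rfl
  | succ m' ih =>
    intro hm cands hInv
    have hm' : m' < t.length := by omega
    have hidx : t.length - (m' + 1) < t.reverse.length := by simp; omega
    have hdrop : t.reverse.drop (t.length - (m' + 1))
        = t[m']'hm' :: t.reverse.drop (t.length - m') := by
      rw [← List.getElem_cons_drop hidx]
      congr 1
      · rw [List.getElem_reverse]
        congr 1
        omega
      · congr 1
        omega
    rw [hdrop]
    have hgetD : t.getD m' ' ' = t[m']'hm' := List.getD_eq_getElem t ' ' hm'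
    simp only [loopA, loopB, hgetD]
    by_cases hd : PySem.Chars.isdigit (t[m']'hm')
    · simp [hd]
    · simp only [hd, Bool.false_eq_true, if_false]
      by_cases hocc : ∃ w ∈ rebmunL, w.reverse <+: t.drop m'
      · obtain ⟨w, hw, hp⟩ := hocc
        have hwne : w ≠ [] := by
          have h3 := rebmun_len w hw; intro h0; rw [h0] at h3; simp at h3
        obtain ⟨hfit, hpt⟩ := (rev_prefix_iff w t m' hwne).mp hp
        rw [scan_of_occurs t m' cands hInv hm' w hw hfit hpt, tryWords_some t m' w hw hp]
      · push Not at hocc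
        have hno : ∀ w ∈ rebmunL,
            ¬ (m' + w.length ≤ t.length ∧ ∀ i < w.length, w[i]? = t[m' + w.length - 1 - i]?) := by
          intro w hw hc
          have hwne : w ≠ [] := by
            have h3 := rebmun_len w hw; intro h0; rw [h0] at h3; simp at h3
          exact hocc w hw ((rev_prefix_iff w t m' hwne).mpr hc)
        obtain ⟨l, hscan, hinv'⟩ := scan_no_occur t m' cands hInv hm' hno
        have hnone : tryWords t m' wordVals = none := by
          apply tryWords_none
          intro p hp hc
          apply hocc p.1.reverse (wordVals_rev_mem p hp)
          rw [List.reverse_reverse]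
          exact hc
        rw [hscan, hnone]
        exact ih (by omega) _ hinv'

-- ===== VERDICT (by name: the statement is the Claim_ definition above) =====
theorem getLastDigitPlus_spec : Claim_equal_getLastDigitPlus := by
  intro s _
  unfold Spec_getLastDigitPlus getLastDigitPlus getLastDigitPlus_alt
  have h := main_loop s.toList s.toList.length le_rfl []
    (by
      constructor
      · intro p hp; cases hp
      · intro w hw j h1 _ hle _; omega)
  simpa using h
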